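-- pv_equiv track=rewrite | github.com/sambacha/s3a | src/tracer/storage_analyzer.py | _get_size_from_mask
-- ===== SOURCE A (Python) =====
-- from typing import Dict, List, Optional, Set, Tuple, Union, Any, DefaultDict
--
-- def _get_size_from_mask(mask: int) -> Optional[int]:
--     """
--     Determine the bit size from a mask value.
--
--     Args:
--         mask: Bitmask value
--
--     Returns:
--         Bit size or None if not determinable
--     """
--     # Count consecutive set bits
--     if mask == 0:
--         return None
--
--     # Remove trailing zeros
--     while mask & 1 == 0:
--         mask >>= 1
--
--     # Count consecutive ones
--     size = 0
--     while mask & 1 == 1: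
--         size += 1
--         mask >>= 1
--
--     return size if mask == 0 else None
-- ===== SOURCE B (Python) =====
-- def _get_size_from_mask(mask: int):
--     if mask == 0:
--         return None
--     # isolate the lowest set bit, shift it away, then check the ones are contiguous
--     low = mask ^ (mask & (mask - 1))
--     shifted = mask >> (low.bit_length() - 1)
--     if shifted & (shifted + 1) == 0:
--         return shifted.bit_length()
--     return None
-- ===== Notes on version B (the rewrite author's own statement) =====
-- stated objective: alternative
-- what changed: Replaces A's two bit-by-bit shift loops with a fixed number of bit operations (isolate the lowest set bit, shift it away, test that shifted+1 is a power of two, read the size off bit_length); Pre_ restricts to non-negative masks, the natural domain of a bitmask, because A loops forever on every negated power of two and its None on the remaining negative masks is accidental (B returns the same None there anyway).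
-- outside the precondition, e.g. on _get_size_from_mask(-5): A returns None, B returns None
import Mathlib
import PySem

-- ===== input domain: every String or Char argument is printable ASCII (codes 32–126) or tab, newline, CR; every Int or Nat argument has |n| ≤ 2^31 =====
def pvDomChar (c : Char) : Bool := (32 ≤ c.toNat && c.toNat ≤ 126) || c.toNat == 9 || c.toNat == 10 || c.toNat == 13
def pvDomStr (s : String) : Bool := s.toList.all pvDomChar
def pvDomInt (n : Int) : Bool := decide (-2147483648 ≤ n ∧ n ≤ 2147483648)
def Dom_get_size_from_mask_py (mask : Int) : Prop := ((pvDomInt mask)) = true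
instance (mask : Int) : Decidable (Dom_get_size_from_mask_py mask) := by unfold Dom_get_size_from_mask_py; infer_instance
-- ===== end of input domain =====

-- B replaces A's two bit-by-bit shift loops by a fixed number of bit operations (isolate
-- the lowest set bit, shift it away, contiguity test, bit_length); proved equal to A for
-- every non-negative mask (on negative masks Python A never returns: its loops run forever).

-- ===== PORT A =====
-- while mask & 1 == 0: mask >>= 1   (fuel = mask.natAbs, enough for every positive mask)
def gsDropZeros : Nat → Int → Int
  | 0, m => m
  | f+1, m => if PySem.Int.band m 1 = 0 then gsDropZeros f (m >>> (1:Nat)) else m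

def gsCountOnes : Nat → Int → Int → Int × Int
  | 0, s, m => (s, m)
  | f+1, s, m => if PySem.Int.band m 1 = 1 then gsCountOnes f (s+1) (m >>> (1:Nat)) else (s, m)

def get_size_from_mask_py (mask : Int) : Option Int :=
  if mask = 0 then none
  else
    let m1 := gsDropZeros mask.natAbs mask
    let p := gsCountOnes m1.natAbs 0 m1
    if p.2 = 0 then some p.1 else none

-- ===== PORT B =====
def get_size_from_mask_py_alt (mask : Int) : Option Int :=
  if mask = 0 then none
  else
    let low := PySem.Int.bxor mask (PySem.Int.band mask (mask - 1))
    let shifted := mask >>> (PySem.Int.bitLength low - 1)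
    if PySem.Int.band shifted (shifted + 1) = 0 then
      some (PySem.Int.bitLength shifted : Int)
    else none

-- ===== PRECONDITION & SPEC =====
-- Pre_ restricts to non-negative masks, the natural domain of a bitmask: Python A loops
-- forever on every negated power of two, and its None on the remaining negative masks is
-- accidental (B happens to return the same None there anyway).
def Pre_get_size_from_mask_py (mask : Int) : Prop := 0 ≤ mask
instance (mask : Int) : Decidable (Pre_get_size_from_mask_py mask) := by unfold Pre_get_size_from_mask_py; infer_instance
def pvWitness_get_size_from_mask_py : Int := 28

def Spec_get_size_from_mask_py (mask : Int) (out : Option Int) : Prop := out = get_size_from_mask_py_alt mask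
instance (mask : Int) (out : Option Int) : Decidable (Spec_get_size_from_mask_py mask out) := by unfold Spec_get_size_from_mask_py; infer_instance

-- ===== CLAIM (what is proved, stated in full; the proofs are below) =====
def Claim_equal_get_size_from_mask_py : Prop := ∀ (mask : Int), Dom_get_size_from_mask_py mask → Pre_get_size_from_mask_py mask → Spec_get_size_from_mask_py mask (get_size_from_mask_py mask)

-- ===== LEMMAS AND PROOFS =====

-- Nat mirrors of A's two loops (used only by the proofs)
def dzN : Nat → Nat → Nat
  | 0, m => m
  | f+1, m => if m % 2 = 0 then dzN f (m / 2) else m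

def coN : Nat → Int → Nat → Int × Nat
  | 0, s, m => (s, m)
  | f+1, s, m => if m % 2 = 1 then coN f (s+1) (m / 2) else (s, m)

lemma gsDropZeros_natCast : ∀ (f : Nat) (m : Nat), gsDropZeros f (m : Int) = ((dzN f m : Nat) : Int) := by
  intro f
  induction f with
  | zero => intro m; simp [gsDropZeros, dzN]
  | succ f ih =>
    intro m
    have hb : PySem.Int.band (m : Int) 1 = ((m &&& 1 : Nat) : Int) := by
      simpa using PySem.Int.band_natCast m 1
    have hs : ((m : Int) >>> (1:Nat)) = ((m >>> 1 : Nat) : Int) := (Int.natCast_shiftRight m 1).symm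
    by_cases h : m % 2 = 0
    · rw [gsDropZeros, hb, hs, if_pos (by simp [Nat.and_one_is_mod, h]), Nat.shiftRight_one, ih, dzN, if_pos h]
    · rw [gsDropZeros, hb, if_neg (by simp [Nat.and_one_is_mod]; omega), dzN, if_neg h]

lemma gsCountOnes_natCast : ∀ (f : Nat) (s : Int) (m : Nat),
    gsCountOnes f s (m : Int) = ((coN f s m).1, ((coN f s m).2 : Int)) := by
  intro f
  induction f with
  | zero => intro s m; simp [gsCountOnes, coN]
  | succ f ih =>
    intro s m
    have hb : PySem.Int.band (m : Int) 1 = ((m &&& 1 : Nat) : Int) := by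
      simpa using PySem.Int.band_natCast m 1
    have hs : ((m : Int) >>> (1:Nat)) = ((m >>> 1 : Nat) : Int) := (Int.natCast_shiftRight m 1).symm
    by_cases h : m % 2 = 1
    · rw [gsCountOnes, hb, hs, if_pos (by simp [Nat.and_one_is_mod, h]), Nat.shiftRight_one, ih, coN, if_pos h]
    · rw [gsCountOnes, hb, if_neg (by simp [Nat.and_one_is_mod]; omega), coN, if_neg h]

lemma tb_two_mul (x : Nat) (i : Nat) : (2*x).testBit (i+1) = x.testBit i := by
  rw [Nat.testBit_succ]; congr 1; omega

lemma tb_two_mul_zero (x : Nat) : (2*x).testBit 0 = false := by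
  rw [Nat.testBit_zero]; simp

lemma and_succ_even (m : Nat) (h : m % 2 = 0) : m &&& (m+1) = m := by
  apply Nat.eq_of_testBit_eq
  intro i
  cases i with
  | zero =>
    simp only [Nat.testBit_land]
    simp only [Nat.testBit_zero]
    have h2 : (m+1) % 2 = 1 := by omega
    simp [h, h2]
  | succ i =>
    simp only [Nat.testBit_land]
    simp only [Nat.testBit_succ]
    have h2 : (m+1)/2 = m/2 := by omega
    rw [h2, Bool.and_self]

lemma and_succ_odd (m : Nat) (h : m % 2 = 1) : m &&& (m+1) = 2 * ((m/2) &&& (m/2+1)) := by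
  apply Nat.eq_of_testBit_eq
  intro i
  cases i with
  | zero =>
    rw [tb_two_mul_zero]
    simp only [Nat.testBit_land]
    simp only [Nat.testBit_zero]
    have h2 : (m+1) % 2 = 0 := by omega
    simp [h2]
  | succ i =>
    rw [tb_two_mul]
    simp only [Nat.testBit_land]
    simp only [Nat.testBit_succ]
    have h2 : (m+1)/2 = m/2 + 1 := by omega
    rw [h2]

lemma low_odd (m : Nat) (h : m % 2 = 1) : m ^^^ (m &&& (m-1)) = 1 := by
  apply Nat.eq_of_testBit_eq
  intro i
  cases i with
  | zero =>
    simp only [Nat.testBit_xor]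
    simp only [Nat.testBit_land]
    simp only [Nat.testBit_zero]
    have h2 : (m-1) % 2 = 0 := by omega
    simp [h, h2]
  | succ i =>
    simp only [Nat.testBit_xor]
    simp only [Nat.testBit_land]
    simp only [Nat.testBit_succ]
    have h2 : (m-1)/2 = m/2 := by omega
    have h3 : (1:Nat)/2 = 0 := by omega
    rw [h2, h3, Bool.and_self, Bool.xor_self, Nat.zero_testBit]

lemma low_even (k : Nat) (hk : 0 < k) :
    (2*k) ^^^ ((2*k) &&& (2*k-1)) = 2 * (k ^^^ (k &&& (k-1))) := by
  apply Nat.eq_of_testBit_eq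
  intro i
  cases i with
  | zero =>
    rw [tb_two_mul_zero]
    simp only [Nat.testBit_xor]
    simp only [Nat.testBit_land]
    rw [tb_two_mul_zero]
    simp
  | succ i =>
    rw [tb_two_mul]
    simp only [Nat.testBit_xor]
    simp only [Nat.testBit_land]
    simp only [Nat.testBit_succ]
    have h2 : 2*k/2 = k := by omega
    have h3 : (2*k-1)/2 = k-1 := by omega
    rw [h2, h3]

lemma low_pos (m : Nat) (h : 0 < m) : 0 < m ^^^ (m &&& (m-1)) := by
  induction m using Nat.strong_induction_on with
  | _ m ih =>
    by_cases hodd : m % 2 = 1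
    · rw [low_odd m hodd]; omega
    · have hk : 0 < m / 2 := by omega
      have hm : m = 2 * (m / 2) := by omega
      rw [hm, low_even (m/2) hk]
      have := ih (m/2) (by omega) hk
      omega

lemma bitLength_pos (l : Nat) (h : 0 < l) : 1 ≤ PySem.Int.bitLength (l : Int) := by
  rw [PySem.Int.bitLength_natCast h]; omega

lemma dzN_odd (f m : Nat) (h : m % 2 = 1) : dzN f m = m := by
  cases f with
  | zero => rfl
  | succ f => rw [dzN, if_neg (by omega)]

lemma coN_char : ∀ (m : Nat) (f : Nat) (s : Int), m ≤ f →
    (if (coN f s m).2 = 0 then some (coN f s m).1 else none)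
      = if m &&& (m+1) = 0 then some (s + (PySem.Int.bitLength (m : Int) : Int)) else none := by
  intro m
  induction m using Nat.strong_induction_on with
  | _ m ih =>
    intro f s hf
    rcases Nat.eq_zero_or_pos m with h0 | hpos
    · subst h0
      have hc : coN f s 0 = (s, 0) := by cases f <;> simp [coN]
      simp [hc, PySem.Int.bitLength_zero]
    · obtain ⟨f', rfl⟩ : ∃ f', f = f' + 1 := ⟨f - 1, by omega⟩
      by_cases hodd : m % 2 = 1
      · rw [coN, if_pos hodd]
        rw [ih (m/2) (by omega) f' (s+1) (by omega)]
        rw [and_succ_odd m hodd, PySem.Int.bitLength_natCast hpos]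
        by_cases hz : (m/2) &&& (m/2+1) = 0
        · rw [if_pos hz, if_pos (by omega)]
          push_cast
          ring_nf
        · rw [if_neg hz, if_neg (by omega)]
      · rw [coN, if_neg hodd]
        have hev : m % 2 = 0 := by omega
        rw [and_succ_even m hev]
        simp [Nat.pos_iff_ne_zero.mp hpos]

lemma shift_helper (k t : Nat) (ht : 1 ≤ t) :
    ((2*k : Nat) : Int) >>> (t + 1 - 1) = ((k : Nat) : Int) >>> (t - 1) := by
  rw [← Int.natCast_shiftRight, ← Int.natCast_shiftRight]
  congr 1
  obtain ⟨u, rfl⟩ : ∃ u, t = u + 1 := ⟨t - 1, by omega⟩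
  have h1 : u + 1 + 1 - 1 = 1 + u := by omega
  rw [h1, Nat.shiftRight_add, Nat.shiftRight_one]
  have h2 : 2 * k / 2 = k := by omega
  have h3 : u + 1 - 1 = u := by omega
  rw [h2, h3]

lemma alt_even (k : Nat) (hk : 0 < k) :
    get_size_from_mask_py_alt ((2*k : Nat) : Int) = get_size_from_mask_py_alt (k : Int) := by
  have hk2 : ((2*k : Nat) : Int) ≠ 0 := by positivity
  have hkne : ((k : Nat) : Int) ≠ 0 := by exact_mod_cast Nat.pos_iff_ne_zero.mp hk
  unfold get_size_from_mask_py_alt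
  rw [if_neg hk2, if_neg hkne]
  dsimp only
  have hsub2 : ((2*k : Nat) : Int) - 1 = ((2*k - 1 : Nat) : Int) := by
    rw [Nat.cast_sub (by omega)]; norm_num
  have hsub1 : ((k : Nat) : Int) - 1 = ((k - 1 : Nat) : Int) := by
    rw [Nat.cast_sub (by omega)]; norm_num
  rw [hsub2, hsub1, PySem.Int.band_natCast, PySem.Int.band_natCast,
      PySem.Int.bxor_natCast, PySem.Int.bxor_natCast]
  rw [low_even k hk]
  have hlp : 0 < k ^^^ (k &&& (k-1)) := low_pos k hk
  have hBL : PySem.Int.bitLength ((2 * (k ^^^ (k &&& (k-1))) : Nat) : Int)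
      = PySem.Int.bitLength ((k ^^^ (k &&& (k-1)) : Nat) : Int) + 1 := by
    rw [PySem.Int.bitLength_natCast (by omega)]
    congr 2
    omega
  rw [hBL]
  rw [shift_helper k _ (bitLength_pos _ hlp)]

lemma main_nat : ∀ (m : Nat), 0 < m → ∀ (f : Nat), m ≤ f →
    (if (coN (dzN f m) 0 (dzN f m)).2 = 0 then some (coN (dzN f m) 0 (dzN f m)).1 else none)
      = get_size_from_mask_py_alt (m : Int) := by
  intro m
  induction m using Nat.strong_induction_on with
  | _ m ih =>
    intro hpos f hf
    by_cases hodd : m % 2 = 1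
    · rw [dzN_odd f m hodd]
      rw [coN_char m m 0 le_rfl]
      have hne : ((m : Nat) : Int) ≠ 0 := by exact_mod_cast Nat.pos_iff_ne_zero.mp hpos
      unfold get_size_from_mask_py_alt
      rw [if_neg hne]
      dsimp only
      have hsub : ((m : Nat) : Int) - 1 = ((m - 1 : Nat) : Int) := by
        rw [Nat.cast_sub (by omega)]; norm_num
      rw [hsub, PySem.Int.band_natCast, PySem.Int.bxor_natCast, low_odd m hodd]
      have hBL1 : PySem.Int.bitLength ((1 : Nat) : Int) = 1 := by
        rw [Nat.cast_one]; decide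
      rw [hBL1]
      have hsh : ((m : Nat) : Int) >>> (1 - 1 : Nat) = ((m : Nat) : Int) := by
        rw [← Int.natCast_shiftRight]
        norm_num
      rw [hsh]
      have hadd : ((m : Nat) : Int) + 1 = ((m + 1 : Nat) : Int) := by push_cast; ring
      rw [hadd, PySem.Int.band_natCast]
      by_cases hz : m &&& (m+1) = 0
      · rw [if_pos hz, if_pos (by exact_mod_cast hz)]
        rw [zero_add]
      · rw [if_neg hz, if_neg (by exact_mod_cast hz)]
    · obtain ⟨f', rfl⟩ : ∃ f', f = f' + 1 := ⟨f - 1, by omega⟩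
      have hev : m % 2 = 0 := by omega
      rw [dzN, if_pos hev]
      rw [ih (m/2) (by omega) (by omega) f' (by omega)]
      have hm : m = 2 * (m / 2) := by omega
      calc get_size_from_mask_py_alt ((m/2 : Nat) : Int)
          = get_size_from_mask_py_alt ((2 * (m/2) : Nat) : Int) := (alt_even (m/2) (by omega)).symm
        _ = get_size_from_mask_py_alt ((m : Nat) : Int) := by rw [← hm]

-- ===== VERDICT (by name: the statement is the Claim_ definition above) =====
theorem get_size_from_mask_py_spec : Claim_equal_get_size_from_mask_py := by
  intro mask _ hpre
  unfold Spec_get_size_from_mask_py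
  lift mask to Nat using hpre with n
  rcases Nat.eq_zero_or_pos n with h0 | hpos
  · subst h0; decide
  · have hne : (n : Int) ≠ 0 := by exact_mod_cast Nat.pos_iff_ne_zero.mp hpos
    unfold get_size_from_mask_py
    rw [if_neg hne]
    simp only [Int.natAbs_natCast, gsDropZeros_natCast, gsCountOnes_natCast, Int.natAbs_natCast]
    have := main_nat n hpos n le_rfl
    simpa [Nat.cast_eq_zero] using this
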